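-- pv_equiv track=rewrite | github.com/jpzgoku/projectEuler | python/40-49/problem47.py | exponents
-- ===== SOURCE A (Python) =====
-- def exponents(arr):
--     original = arr[:]
--     counter = 0
--     while counter < len(arr) - 1:
--         if arr[counter] > arr[counter + 1]:
--             return original
--         if arr[counter] == arr[counter + 1]:
--             del arr[counter + 1]
--             arr[counter] *= arr[counter]
--         else:
--             counter += 1
--     return arr
-- ===== SOURCE B (Python) =====
-- def exponents(arr):
--     # Single forward pass with a running current value; no in-place deletions.
--     # Note: A mutates arr in place; equivalence is about the return value only.
--     if not arr:
--         return arr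
--     out = []
--     cur = arr[0]
--     for x in arr[1:]:
--         if cur > x:
--             return arr[:]
--         if cur == x:
--             cur *= cur
--         else:
--             out.append(cur)
--             cur = x
--     out.append(cur)
--     return out
-- ===== Notes on version B (the rewrite author's own statement) =====
-- stated objective: alternative
-- what changed: Replaced A's while-loop with in-place del/shift and index re-checking by one forward pass carrying a running current value and an appended output list, with no deletions.
import Mathlib
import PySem

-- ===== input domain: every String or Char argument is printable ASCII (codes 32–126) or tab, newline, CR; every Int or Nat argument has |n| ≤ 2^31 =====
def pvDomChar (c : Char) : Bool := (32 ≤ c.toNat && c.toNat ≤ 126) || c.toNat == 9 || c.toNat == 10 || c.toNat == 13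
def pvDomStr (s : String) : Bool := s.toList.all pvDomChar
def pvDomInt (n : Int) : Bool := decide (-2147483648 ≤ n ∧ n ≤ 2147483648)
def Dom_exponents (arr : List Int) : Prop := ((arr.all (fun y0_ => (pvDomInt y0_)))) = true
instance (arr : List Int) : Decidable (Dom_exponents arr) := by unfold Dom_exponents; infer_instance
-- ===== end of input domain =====

-- B replaces A's in-place delete/shift loop by one forward pass with a running
-- current value (return value only: A mutates its argument in place, B does not).

-- ===== PORT A =====
-- while-loop of A; counter starts at 0 and only increments, so it is a Nat.
-- Indexing uses getD: inside the loop counter+1 < arr.length, so both reads are in range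
-- and getD equals Python's in-range arr[counter] exactly (the default is never used).
def exponentsLoopA (arr : List Int) (orig : List Int) (counter : Nat) : List Int :=
  if h : counter < arr.length - 1 then
    let a := arr.getD counter 0
    let b := arr.getD (counter + 1) 0
    if a > b then orig
    else if a = b then
      exponentsLoopA ((arr.eraseIdx (counter + 1)).set counter (a * a)) orig counter
    else
      exponentsLoopA arr orig (counter + 1)
  else arr
termination_by arr.length - counter
decreasing_by
  · have h2 : counter + 1 < arr.length := by omega
    simp only [List.length_set, List.length_eraseIdx, if_pos h2]; omega
  · omega

def exponents (arr : List Int) : List Int := exponentsLoopA arr arr 0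

-- ===== PORT B =====
-- Source B's for-loop: cur is the running value, out the appended prefix, orig = arr (returned on abort).
def exponentsLoopB (cur : Int) (rest : List Int) (out : List Int) (orig : List Int) : List Int :=
  match rest with
  | [] => out ++ [cur]
  | x :: xs =>
    if cur > x then orig
    else if cur = x then exponentsLoopB (cur * cur) xs out orig
    else exponentsLoopB x xs (out ++ [cur]) orig

def exponents_alt (arr : List Int) : List Int :=
  match arr with
  | [] => arr
  | a :: rest => exponentsLoopB a rest [] arr

-- ===== PRECONDITION & SPEC =====
def Spec_exponents (arr : List Int) (out : List Int) : Prop := out = exponents_alt arr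
instance (arr : List Int) (out : List Int) : Decidable (Spec_exponents arr out) := by unfold Spec_exponents; infer_instance

-- ===== CLAIM (what is proved, stated in full; the proofs are below) =====
def Claim_equal_exponents : Prop := ∀ (arr : List Int), Dom_exponents arr → Spec_exponents arr (exponents arr)

-- ===== LEMMAS AND PROOFS =====

lemma getD_mid (done : List Int) (cur : Int) (rest : List Int) :
    (done ++ cur :: rest).getD done.length 0 = cur := by
  simp

lemma getD_mid' (done : List Int) (cur x : Int) (xs : List Int) :
    (done ++ cur :: x :: xs).getD (done.length + 1) 0 = x := by
  have h := getD_mid (done ++ [cur]) x xs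
  simp only [List.length_append, List.length_cons, List.length_nil, List.append_assoc,
    List.cons_append, List.nil_append, Nat.zero_add] at h
  exact h

lemma erase_mid (done : List Int) (cur x : Int) (xs : List Int) :
    (done ++ cur :: x :: xs).eraseIdx (done.length + 1) = done ++ cur :: xs := by
  induction done with
  | nil => rfl
  | cons d ds ih => simp [ih]

lemma set_mid (done : List Int) (cur v : Int) (xs : List Int) :
    (done ++ cur :: xs).set done.length v = done ++ v :: xs := by
  induction done with
  | nil => rfl
  | cons d ds ih => simp [ih]

lemma loop_eq (rest : List Int) : ∀ (done : List Int) (cur : Int) (orig : List Int),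
    exponentsLoopA (done ++ cur :: rest) orig done.length =
      exponentsLoopB cur rest done orig := by
  induction rest with
  | nil =>
    intro done cur orig
    rw [exponentsLoopA]
    simp [exponentsLoopB]
  | cons x xs ih =>
    intro done cur orig
    rw [exponentsLoopA]
    have hlen : done.length < (done ++ cur :: x :: xs).length - 1 := by
      simp only [List.length_append, List.length_cons]; omega
    rw [dif_pos hlen]
    simp only [getD_mid, getD_mid']
    by_cases h1 : cur > x
    · simp [exponentsLoopB, h1]
    · rw [if_neg h1]
      by_cases h2 : cur = x
      · rw [if_pos h2, erase_mid, set_mid, ih done (cur * cur) orig]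
        simp [exponentsLoopB, h2]
      · rw [if_neg h2]
        have : done.length + 1 = (done ++ [cur]).length := by simp
        rw [show done ++ cur :: x :: xs = (done ++ [cur]) ++ x :: xs by simp, this,
          ih (done ++ [cur]) x orig]
        simp [exponentsLoopB, h1, h2]

-- ===== VERDICT (by name: the statement is the Claim_ definition above) =====
theorem exponents_spec : Claim_equal_exponents := by
  intro arr _
  unfold Spec_exponents exponents exponents_alt
  cases arr with
  | nil => rw [exponentsLoopA]; simp
  | cons a rest => exact loop_eq rest [] a (a :: rest)
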